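-- pv_equiv track=rewrite | github.com/parkjungha/coding-test | week7/110옮기기.py | solution
-- ===== SOURCE A (Python) =====
-- def solution(s):
--     answer = []
--     for string in s:
--         cnt, idx, stack = 0, 0, ""
--         while idx < len(string):
--             if string[idx] == "0" and stack[-2:] == "11": # 110 찾기
--                 stack = stack[:-2]
--                 cnt += 1
--             else:
--                 stack += string[idx]
--             idx += 1
--         idx = stack.find("111") # 110이 빠진 string에서 111 찾기
--         if idx == -1: # 없다면
--             idx = stack.rfind('0') # 가장 뒤쪽에 있는 0의 idx
--             stack = stack[:idx+1] + "110"*cnt + stack[idx+1:] #뒤에 110 반복해서 붙이기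
--         else: # 111 있으면 앞에 110 반복해서 붙이기
--             stack = stack[:idx] + "110"*cnt + stack[idx:]
--         answer.append(stack)
--     return answer
-- ===== SOURCE B (Python) =====
-- def solution(s):
--     answer = []
--     for string in s:
--         parts = []      # flushed chunks: runs of '1's closed by a non-'1' char; append-only
--         flen = 0        # total length of flushed text
--         cnt = 0         # number of "110" groups removed
--         ones = 0        # length of the current trailing run of '1's
--         pos111 = -1     # start of the first "111" in the flushed text, or -1
--         zend = 0        # index just after the last '0' in the flushed text (0 if none)
--         for ch in string:
--             if ch == '1':
--                 ones += 1
--             elif ch == '0' and ones >= 2: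
--                 ones -= 2
--                 cnt += 1
--             else:
--                 if pos111 == -1 and ones >= 3:
--                     pos111 = flen
--                 parts.append('1' * ones + ch)
--                 flen += ones + 1
--                 if ch == '0':
--                     zend = flen
--                 ones = 0
--         if pos111 == -1 and ones >= 3:
--             pos111 = flen
--         res = ''.join(parts) + '1' * ones
--         i = pos111 if pos111 != -1 else zend
--         answer.append(res[:i] + '110' * cnt + res[i:])
--     return answer
-- ===== Notes on version B (the rewrite author's own statement) =====
-- stated objective: alternative
-- what changed: Replaces A's character-stack simulation plus post-hoc find('111')/rfind('0') searches by a single-pass run-length state machine that keeps the trailing run of '1's as a counter (append-only chunks, no popping) and tracks the insertion position (first '111' start / end of last '0') on the fly, so no search pass over the reduced string is needed.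
import Mathlib
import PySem

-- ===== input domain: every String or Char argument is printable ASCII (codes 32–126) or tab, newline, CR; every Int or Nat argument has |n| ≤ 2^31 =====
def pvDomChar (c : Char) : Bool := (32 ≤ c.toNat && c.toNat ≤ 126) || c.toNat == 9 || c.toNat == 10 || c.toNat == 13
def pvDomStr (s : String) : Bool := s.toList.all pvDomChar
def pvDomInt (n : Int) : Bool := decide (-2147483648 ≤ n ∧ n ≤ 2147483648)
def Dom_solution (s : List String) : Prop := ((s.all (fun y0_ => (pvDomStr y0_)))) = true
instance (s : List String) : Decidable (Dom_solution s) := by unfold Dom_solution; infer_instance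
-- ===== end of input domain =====

-- B replaces A's character-stack simulation + post-hoc find('111')/rfind('0') searches by a
-- one-pass run-length state machine (trailing-'1'-run counter, append-only chunks, insertion
-- index tracked on the fly): a different algorithm of the same measured cost.

-- ===== PORT A =====
-- body of A's while loop: one step of the string-stack simulation (stack[-2:] test, slicing)
def aStep (p : Int × List Char) (c : Char) : Int × List Char :=
  if c = '0' ∧ PySem.List.slice p.2 (some (-2)) none = ['1', '1'] then
    (p.1 + 1, PySem.List.slice p.2 none (some (-2)))
  else (p.1, p.2 ++ [c])

-- per-string body of A's outer for loop: the while loop as a fold of aStep, then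
-- find("111") / rfind('0') and the slice-and-concatenate reinsertion, as in A.
def solutionStep (string : String) : String :=
  let st := string.toList.foldl aStep (0, [])
  let cnt := st.1
  let stack := st.2
  let idx := PySem.Chars.find stack ['1', '1', '1']
  if idx = -1 then
    let idx2 := PySem.Chars.rfind stack ['0']
    String.ofList (PySem.List.slice stack none (some (idx2 + 1)) ++
      PySem.List.pyRepeat ['1', '1', '0'] cnt ++
      PySem.List.slice stack (some (idx2 + 1)) none)
  else
    String.ofList (PySem.List.slice stack none (some idx) ++
      PySem.List.pyRepeat ['1', '1', '0'] cnt ++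
      PySem.List.slice stack (some idx) none)

def solution (s : List String) : List String := s.map solutionStep

-- ===== PORT B =====
-- B's per-character state: flushed chunks, their total length, removal count, the current
-- trailing run of '1's, the first-'111' position (or -1) and the index after the last '0'.
structure BState where
  parts : List (List Char)
  flen : Int
  cnt : Int
  ones : Int
  pos111 : Int
  zend : Int
deriving Repr, DecidableEq

-- body of B's inner for loop, transcribed branch for branch
def bStep (st : BState) (ch : Char) : BState :=
  if ch = '1' then { st with ones := st.ones + 1 }
  else if ch = '0' ∧ 2 ≤ st.ones then { st with ones := st.ones - 2, cnt := st.cnt + 1 }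
  else
    { parts := st.parts ++ [PySem.List.pyRepeat ['1'] st.ones ++ [ch]],
      flen := st.flen + st.ones + 1,
      cnt := st.cnt,
      ones := 0,
      pos111 := if st.pos111 = -1 ∧ 3 ≤ st.ones then st.flen else st.pos111,
      zend := if ch = '0' then st.flen + st.ones + 1 else st.zend }

-- per-string body of B's outer loop: fold bStep, join once, slice at the tracked index
def solutionAltStep (string : String) : String :=
  let st := string.toList.foldl bStep ⟨[], 0, 0, 0, -1, 0⟩
  let pos111 := if st.pos111 = -1 ∧ 3 ≤ st.ones then st.flen else st.pos111
  let res := PySem.Chars.join [] st.parts ++ PySem.List.pyRepeat ['1'] st.ones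
  let i := if pos111 ≠ -1 then pos111 else st.zend
  String.ofList (PySem.List.slice res none (some i) ++
    PySem.List.pyRepeat ['1', '1', '0'] st.cnt ++
    PySem.List.slice res (some i) none)

def solution_alt (s : List String) : List String := s.map solutionAltStep

-- ===== PRECONDITION & SPEC =====
def Spec_solution (s : List String) (out : List String) : Prop := out = solution_alt s
instance (s : List String) (out : List String) : Decidable (Spec_solution s out) := by unfold Spec_solution; infer_instance

-- ===== CLAIM (what is proved, stated in full; the proofs are below) =====
def Claim_equal_solution : Prop := ∀ (s : List String), Dom_solution s → Spec_solution s (solution s)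

-- ===== LEMMAS AND PROOFS =====

-- "111" occurs at position i / '0' occurs at position i, as plain index statements
def Occ3 (s : List Char) (i : Nat) : Prop :=
  s[i]? = some '1' ∧ s[i+1]? = some '1' ∧ s[i+2]? = some '1'

def Pos111OK (F : List Char) (p : Int) : Prop :=
  (p = -1 ∧ ∀ i, ¬ Occ3 F i) ∨ (∃ k : Nat, p = (k : Int) ∧ Occ3 F k ∧ ∀ i < k, ¬ Occ3 F i)

def ZendOK (F : List Char) (z : Int) : Prop :=
  (z = 0 ∧ ∀ i : Nat, F[i]? ≠ some '0') ∨
  (∃ k : Nat, z = (k : Int) + 1 ∧ F[k]? = some '0' ∧ ∀ i, k < i → F[i]? ≠ some '0')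

-- an "111" occurrence starting strictly inside the flushed text lies wholly inside it

def StInv (a : Int × List Char) (b : BState) : Prop :=
  a.2 = b.parts.flatten ++ List.replicate b.ones.toNat '1'
  ∧ a.1 = b.cnt
  ∧ 0 ≤ b.ones
  ∧ b.flen = (b.parts.flatten.length : Int)
  ∧ b.parts.flatten.getLast? ≠ some '1'
  ∧ Pos111OK b.parts.flatten b.pos111
  ∧ ZendOK b.parts.flatten b.zend


theorem drop_cons_of_get (s : List Char) (i : Nat) (c : Char) (h : s[i]? = some c) :
    s.drop i = c :: s.drop (i+1) := by
  rw [List.getElem?_eq_some_iff] at h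
  obtain ⟨hi, hc⟩ := h
  rw [List.drop_eq_getElem_cons hi, hc]

theorem occ3_iff (s : List Char) (i : Nat) :
    ['1','1','1'] <+: s.drop i ↔ Occ3 s i := by
  unfold Occ3
  constructor
  · rintro ⟨r, hr⟩
    have h0 := congrArg (fun t => t[0]?) hr
    have h1 := congrArg (fun t => t[1]?) hr
    have h2 := congrArg (fun t => t[2]?) hr
    simp [List.getElem?_drop] at h0 h1 h2
    exact ⟨h0.symm, h1.symm, h2.symm⟩
  · rintro ⟨h0, h1, h2⟩
    refine ⟨s.drop (i+3), ?_⟩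
    rw [drop_cons_of_get s i '1' h0, drop_cons_of_get s (i+1) '1' h1,
        drop_cons_of_get s (i+2) '1' h2]
    simp

theorem occ0_iff (s : List Char) (i : Nat) :
    ['0'] <+: s.drop i ↔ s[i]? = some '0' := by
  constructor
  · rintro ⟨r, hr⟩
    have h0 := congrArg (fun t => t[0]?) hr
    simp [List.getElem?_drop] at h0
    exact h0.symm
  · intro h0
    exact ⟨s.drop (i+1), by rw [drop_cons_of_get s i '0' h0]; rfl⟩

theorem find_eq_of (s sub : List Char) (k : Nat) (h1 : sub <+: s.drop k)
    (h2 : ∀ i < k, ¬ sub <+: s.drop i) : PySem.Chars.find s sub = (k : Int) := by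
  have hinf : sub <:+: s := by
    obtain ⟨r, hr⟩ := h1
    exact ⟨s.take k, r, by rw [List.append_assoc, hr]; simp⟩
  have hnn : 0 ≤ PySem.Chars.find s sub := (PySem.Chars.find_nonneg_iff s sub).mpr hinf
  obtain ⟨hpre, hmin⟩ := PySem.Chars.find_spec hnn
  have : (PySem.Chars.find s sub).toNat = k := by
    rcases Nat.lt_trichotomy (PySem.Chars.find s sub).toNat k with h | h | h
    · exact absurd hpre (h2 _ h)
    · exact h
    · exact absurd h1 (hmin k h)
  omega

theorem find_eq_neg_one' (s sub : List Char) (h : ∀ j, ¬ sub <+: s.drop j) :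
    PySem.Chars.find s sub = -1 := by
  rw [PySem.Chars.find_eq_neg_one_iff]
  intro hinf
  obtain ⟨j, hj⟩ := (PySem.Chars.exists_prefix_drop_iff_isIn sub s).mpr
      ((PySem.Chars.isIn_iff_infix sub s).mpr hinf)
  exact h j hj

theorem rfind_go_eq (s sub : List Char) (j k : Nat) (hk : k ≤ j) (h1 : sub <+: s.drop k)
    (h2 : ∀ i, k < i → i ≤ j → ¬ sub <+: s.drop i) : PySem.Chars.rfind.go s sub j = (k : Int) := by
  induction j with
  | zero =>
    interval_cases k
    simp [PySem.Chars.rfind.go, List.isPrefixOf_iff_prefix]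
    simpa using h1
  | succ n ih =>
    rcases Nat.lt_or_ge k (n+1) with h | h
    case inr =>
      have hk1 : k = n+1 := by omega
      subst hk1
      simp [PySem.Chars.rfind.go, List.isPrefixOf_iff_prefix]
      intro hc
      exact absurd h1 hc
    case inl =>
      have hne : ¬ sub <+: s.drop (n+1) := h2 _ (by omega) (by omega)
      simp [PySem.Chars.rfind.go, List.isPrefixOf_iff_prefix, hne]
      exact ih (by omega) (fun i hi1 hi2 => h2 i hi1 (by omega))

theorem rfind_go_neg (s sub : List Char) (j : Nat) (h : ∀ i ≤ j, ¬ sub <+: s.drop i) :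
    PySem.Chars.rfind.go s sub j = -1 := by
  induction j with
  | zero => simp [PySem.Chars.rfind.go, List.isPrefixOf_iff_prefix]; simpa using h 0 (by omega)
  | succ n ih =>
    have hne : ¬ sub <+: s.drop (n+1) := h _ (by omega)
    simp [PySem.Chars.rfind.go, List.isPrefixOf_iff_prefix, hne]
    exact ih (fun i hi => h i (by omega))

theorem idx_helper (F : List Char) (t : Nat) (tail : List Char) (i : Nat) :
    (F ++ (List.replicate t '1' ++ tail))[i]? =
      if i < F.length then F[i]?
      else if i < F.length + t then some '1'
      else tail[i - F.length - t]? := by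
  rcases Nat.lt_or_ge i F.length with h | h
  · rw [List.getElem?_append_left h, if_pos h]
  · rw [List.getElem?_append_right h, if_neg (by omega)]
    rcases Nat.lt_or_ge i (F.length + t) with h2 | h2
    · rw [List.getElem?_append_left (by simp; omega), if_pos h2]
      simp [List.getElem?_replicate]
      omega
    · rw [List.getElem?_append_right (by simp; omega), if_neg (by omega)]
      simp

theorem occ3_left (F : List Char) (t : Nat) (tail : List Char)
    (hF : F.getLast? ≠ some '1') (i : Nat) (hi : i < F.length)
    (h : Occ3 (F ++ (List.replicate t '1' ++ tail)) i) : Occ3 F i := by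
  obtain ⟨h0, h1, h2⟩ := h
  rw [idx_helper] at h0 h1 h2
  have hlast : F[F.length - 1]? ≠ some '1' := by
    rwa [List.getLast?_eq_getElem?] at hF
  rcases Nat.lt_or_ge (i+2) F.length with hin | hout
  · exact ⟨by rwa [if_pos hi] at h0, by rwa [if_pos (by omega)] at h1,
      by rwa [if_pos hin] at h2⟩
  · exfalso
    rcases Nat.lt_or_ge (i+1) F.length with hmid | hmid
    · apply hlast; rw [show F.length - 1 = i+1 by omega]; rwa [if_pos hmid] at h1
    · apply hlast; rw [show F.length - 1 = i by omega]; rwa [if_pos hi] at h0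

-- no "111" occurrence starts in the run/terminator region when the run is short

theorem occ3_right_short (F : List Char) (t : Nat) (c : Char) (hc : c ≠ '1') (ht : t < 3)
    (i : Nat) (hi : F.length ≤ i) : ¬ Occ3 (F ++ (List.replicate t '1' ++ [c])) i := by
  rintro ⟨h0, h1, h2⟩
  rw [idx_helper] at h0 h1 h2
  rw [if_neg (by omega)] at h0 h1 h2
  by_cases hb0 : i < F.length + t
  · by_cases hb2 : i + 2 < F.length + t
    · omega
    · rw [if_neg hb2] at h2
      by_cases he : i + 2 - F.length - t = 0
      · simp [he] at h2; exact hc h2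
      · rw [List.getElem?_eq_none (by simp; omega)] at h2; simp at h2
  · rw [if_neg hb0] at h0
    by_cases he : i - F.length - t = 0
    · simp [he] at h0; exact hc h0
    · rw [List.getElem?_eq_none (by simp; omega)] at h0; simp at h0

-- no "111" occurrence at all in the run region when the list ends with the run

theorem occ3_run_short (F : List Char) (t : Nat) (ht : t < 3)
    (i : Nat) (hi : F.length ≤ i) : ¬ Occ3 (F ++ (List.replicate t '1' ++ ([] : List Char))) i := by
  rintro ⟨h0, h1, h2⟩
  rw [idx_helper] at h0 h2
  rw [if_neg (by omega)] at h0 h2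
  by_cases hb0 : i < F.length + t
  · by_cases hb2 : i + 2 < F.length + t
    · omega
    · rw [if_neg hb2] at h2; simp at h2
  · rw [if_neg hb0] at h0; simp at h0

-- "111" does start at the beginning of a long run

theorem occ3_run_long (F : List Char) (t : Nat) (tail : List Char) (ht : 3 ≤ t) :
    Occ3 (F ++ (List.replicate t '1' ++ tail)) F.length := by
  refine ⟨?_, ?_, ?_⟩ <;> (rw [idx_helper, if_neg (by omega), if_pos (by omega)])

theorem pos111_flush (F : List Char) (t : Nat) (c : Char) (p : Int)
    (hF : F.getLast? ≠ some '1') (hc : c ≠ '1') (hp : Pos111OK F p) :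
    Pos111OK (F ++ (List.replicate t '1' ++ [c]))
      (if p = -1 ∧ 3 ≤ (t : Int) then (F.length : Int) else p) := by
  rcases hp with ⟨hp1, hno⟩ | ⟨k, hk, hocc, hmin⟩
  · by_cases h3 : 3 ≤ t
    · rw [if_pos ⟨hp1, by exact_mod_cast h3⟩]
      refine Or.inr ⟨F.length, rfl, occ3_run_long F t [c] h3, fun i hi hocc' => ?_⟩
      exact hno i (occ3_left F t [c] hF i hi hocc')
    · rw [if_neg (by omega)]
      refine Or.inl ⟨hp1, fun i hocc' => ?_⟩
      rcases Nat.lt_or_ge i F.length with hi | hi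
      · exact hno i (occ3_left F t [c] hF i hi hocc')
      · exact occ3_right_short F t c hc (by omega) i hi hocc'
  · have hpge : (0:Int) ≤ p := by rw [hk]; exact_mod_cast Nat.zero_le k
    rw [if_neg (by rintro ⟨h1, -⟩; omega)]
    have hk2 : k + 2 < F.length := (List.getElem?_eq_some_iff.mp hocc.2.2).1
    refine Or.inr ⟨k, hk, ⟨?_, ?_, ?_⟩, fun i hi hocc' => ?_⟩
    · rw [idx_helper, if_pos (by omega)]; exact hocc.1
    · rw [idx_helper, if_pos (by omega)]; exact hocc.2.1
    · rw [idx_helper, if_pos (by omega)]; exact hocc.2.2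
    · exact hmin i hi (occ3_left F t [c] hF i (by omega) hocc')

theorem zend_flush (F : List Char) (t : Nat) (c : Char) (z : Int) (hz : ZendOK F z) :
    ZendOK (F ++ (List.replicate t '1' ++ [c]))
      (if c = '0' then (F.length : Int) + (t : Int) + 1 else z) := by
  by_cases hc : c = '0'
  · rw [if_pos hc]
    refine Or.inr ⟨F.length + t, by push_cast; ring, ?_, fun i hi => ?_⟩
    · rw [idx_helper, if_neg (by omega), if_neg (by omega)]
      simp [hc]
    · rw [idx_helper, if_neg (by omega), if_neg (by omega)]
      rw [List.getElem?_eq_none (by simp; omega)]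
      simp
  · rw [if_neg hc]
    have hnotc : ∀ i : Nat, F.length ≤ i → (F ++ (List.replicate t '1' ++ [c]))[i]? ≠ some '0' := by
      intro i hi
      rw [idx_helper, if_neg (by omega)]
      by_cases hb : i < F.length + t
      · rw [if_pos hb]; simp
      · rw [if_neg hb]
        by_cases he : i - F.length - t = 0
        · simp [he]; exact fun h => hc h
        · rw [List.getElem?_eq_none (by simp; omega)]; simp
    rcases hz with ⟨hz1, hno⟩ | ⟨k, hk, h0, hafter⟩
    · refine Or.inl ⟨hz1, fun i => ?_⟩
      rcases Nat.lt_or_ge i F.length with hi | hi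
      · rw [idx_helper, if_pos hi]; exact hno i
      · exact hnotc i hi
    · have hkL : k < F.length := (List.getElem?_eq_some_iff.mp h0).1
      refine Or.inr ⟨k, hk, ?_, fun i hi => ?_⟩
      · rw [idx_helper, if_pos hkL]; exact h0
      · rcases Nat.lt_or_ge i F.length with hiL | hiL
        · rw [idx_helper, if_pos hiL]; exact hafter i hi
        · exact hnotc i hiL

theorem final_find (F : List Char) (t : Nat) (p : Int)
    (hF : F.getLast? ≠ some '1') (hp : Pos111OK F p) :
    PySem.Chars.find (F ++ List.replicate t '1') ['1','1','1'] =
      (if p = -1 ∧ 3 ≤ (t : Int) then (F.length : Int) else p) := by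
  have hrw : F ++ List.replicate t '1' = F ++ (List.replicate t '1' ++ ([] : List Char)) := by simp
  rcases hp with ⟨hp1, hno⟩ | ⟨k, hk, hocc, hmin⟩
  · by_cases h3 : 3 ≤ t
    · rw [if_pos ⟨hp1, by exact_mod_cast h3⟩]
      apply find_eq_of
      · rw [occ3_iff, hrw]; exact occ3_run_long F t [] h3
      · intro i hi
        rw [occ3_iff, hrw]
        exact fun hocc' => hno i (occ3_left F t [] hF i hi hocc')
    · rw [if_neg (by omega)]
      rw [hp1]
      apply find_eq_neg_one'
      intro j
      rw [occ3_iff, hrw]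
      rcases Nat.lt_or_ge j F.length with hj | hj
      · exact fun hocc' => hno j (occ3_left F t [] hF j hj hocc')
      · exact occ3_run_short F t (by omega) j hj
  · have hk2 : k + 2 < F.length := (List.getElem?_eq_some_iff.mp hocc.2.2).1
    rw [if_neg (by rintro ⟨h1, -⟩; omega)]
    rw [hk]
    apply find_eq_of
    · rw [occ3_iff, hrw]
      exact ⟨by rw [idx_helper, if_pos (by omega)]; exact hocc.1,
             by rw [idx_helper, if_pos (by omega)]; exact hocc.2.1,
             by rw [idx_helper, if_pos (by omega)]; exact hocc.2.2⟩
    · intro i hi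
      rw [occ3_iff, hrw]
      exact fun hocc' => hmin i hi (occ3_left F t [] hF i (by omega) hocc')

theorem final_rfind (F : List Char) (t : Nat) (z : Int) (hz : ZendOK F z) :
    PySem.Chars.rfind (F ++ List.replicate t '1') ['0'] = z - 1 := by
  have hrw : ∀ i : Nat, (F ++ List.replicate t '1')[i]? =
      (if i < F.length then F[i]? else if i < F.length + t then some '1' else none) := by
    intro i
    have := idx_helper F t [] i
    simpa using this
  rcases hz with ⟨hz1, hno⟩ | ⟨k, hk, h0, hafter⟩
  · have hgo : ∀ i ≤ (F ++ List.replicate t '1').length,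
        ¬ ['0'] <+: (F ++ List.replicate t '1').drop i := by
      intro i _
      rw [occ0_iff, hrw]
      by_cases hi : i < F.length
      · rw [if_pos hi]; exact hno i
      · rw [if_neg hi]
        by_cases hb : i < F.length + t
        · rw [if_pos hb]; simp
        · rw [if_neg hb]; simp
    show PySem.Chars.rfind.go _ _ _ = _
    rw [rfind_go_neg _ _ _ hgo, hz1]
    norm_num
  · have hkL : k < F.length := (List.getElem?_eq_some_iff.mp h0).1
    have hh1 : ['0'] <+: (F ++ List.replicate t '1').drop k := by
      rw [occ0_iff, hrw, if_pos hkL]; exact h0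
    have hh2 : ∀ i, k < i → i ≤ (F ++ List.replicate t '1').length →
        ¬ ['0'] <+: (F ++ List.replicate t '1').drop i := by
      intro i hi _
      rw [occ0_iff, hrw]
      by_cases hiL : i < F.length
      · rw [if_pos hiL]; exact hafter i hi
      · rw [if_neg hiL]
        by_cases hb : i < F.length + t
        · rw [if_pos hb]; simp
        · rw [if_neg hb]; simp
    show PySem.Chars.rfind.go _ _ _ = _
    rw [rfind_go_eq (F ++ List.replicate t '1') ['0'] _ k (by simp; omega) hh1 hh2]
    omega

-- A's test stack[-2:] == "11" is exactly "the trailing '1'-run has length ≥ 2"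

theorem lastTwo (F : List Char) (t : Nat) (hF : F.getLast? ≠ some '1') :
    PySem.List.slice (F ++ List.replicate t '1') (some (-2)) none = ['1','1'] ↔ 2 ≤ t := by
  rw [PySem.List.slice_from_neg_ofNat _ 2 (by norm_num)]
  set s := F ++ List.replicate t '1' with hs
  have hlen : s.length = F.length + t := by simp [hs]
  have hrw : ∀ i : Nat, s[i]? =
      (if i < F.length then F[i]? else if i < F.length + t then some '1' else none) := by
    intro i
    have := idx_helper F t [] i
    simpa using this
  constructor
  · intro h
    by_contra ht
    have hL : 2 ≤ s.length := by
      have := congrArg List.length h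
      simp at this
      omega
    have h1 : s[s.length - 1]? = some '1' := by
      have := congrArg (fun l => l[1]?) h
      simp [List.getElem?_drop] at this
      rw [show s.length - 2 + 1 = s.length - 1 by omega] at this
      exact this
    have h0 : s[s.length - 2]? = some '1' := by
      have := congrArg (fun l => l[0]?) h
      simp [List.getElem?_drop] at this
      exact this
    have hlast : F[F.length - 1]? ≠ some '1' := by
      rwa [List.getLast?_eq_getElem?] at hF
    interval_cases t
    · rw [hrw, if_pos (by omega)] at h1
      exact hlast (by rw [show F.length - 1 = s.length - 1 by omega]; exact h1)
    · rw [hrw, if_pos (by omega)] at h0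
      exact hlast (by rw [show F.length - 1 = s.length - 2 by omega]; exact h0)
  · intro ht
    rw [show s.length - 2 = F.length + (t - 2) by omega, hs, List.drop_append]
    rw [List.drop_of_length_le (by omega), List.drop_replicate,
      show t - (F.length + (t - 2) - F.length) = 2 by omega]
    rfl

-- A's stack[:-2] pops the two trailing '1's

theorem popTwo (F : List Char) (t : Nat) (h : 2 ≤ t) :
    PySem.List.slice (F ++ List.replicate t '1') none (some (-2)) =
      F ++ List.replicate (t - 2) '1' := by
  rw [PySem.List.slice_to_neg_ofNat _ 2 (by norm_num)]
  rw [show (F ++ List.replicate t '1').length - 2 = F.length + (t - 2) by simp; omega]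
  rw [List.take_append]
  rw [List.take_of_length_le (by omega), List.take_replicate,
    show min (F.length + (t - 2) - F.length) t = t - 2 by omega]

theorem step_inv (a : Int × List Char) (b : BState) (c : Char) (h : StInv a b) :
    StInv (aStep a c) (bStep b c) := by
  obtain ⟨hstack, hcnt, hones, hflen, hlast, hpos, hzend⟩ := h
  by_cases hc1 : c = '1'
  · subst hc1
    have hA : aStep a '1' = (a.1, a.2 ++ ['1']) := by
      unfold aStep
      rw [if_neg (by rintro ⟨h, -⟩; exact absurd h (by decide))]
    have hB : bStep b '1' = { b with ones := b.ones + 1 } := by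
      unfold bStep
      rw [if_pos rfl]
    rw [hA, hB]
    refine ⟨?_, hcnt, by show (0:Int) ≤ b.ones + 1; omega, hflen, hlast, hpos, hzend⟩
    show a.2 ++ ['1'] = b.parts.flatten ++ List.replicate (b.ones + 1).toNat '1'
    rw [hstack, show (b.ones + 1).toNat = b.ones.toNat + 1 by omega,
      List.replicate_succ', ← List.append_assoc]
  · by_cases hc0 : c = '0' ∧ 2 ≤ b.ones
    · -- pop case
      obtain ⟨hc0', h2⟩ := hc0
      subst hc0'
      have ht2 : 2 ≤ b.ones.toNat := by omega
      have hcond : PySem.List.slice a.2 (some (-2)) none = ['1','1'] := by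
        rw [hstack]
        exact (lastTwo _ _ hlast).mpr ht2
      have hA : aStep a '0' = (a.1 + 1, PySem.List.slice a.2 none (some (-2))) := by
        unfold aStep
        rw [if_pos ⟨rfl, hcond⟩]
      have hB : bStep b '0' = { b with ones := b.ones - 2, cnt := b.cnt + 1 } := by
        unfold bStep
        rw [if_neg (by decide), if_pos ⟨rfl, h2⟩]
      rw [hA, hB]
      refine ⟨?_, by simp [hcnt], by show (0:Int) ≤ b.ones - 2; omega, hflen, hlast, hpos, hzend⟩
      show PySem.List.slice a.2 none (some (-2)) =
        b.parts.flatten ++ List.replicate (b.ones - 2).toNat '1'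
      rw [hstack, popTwo _ _ ht2, show (b.ones - 2).toNat = b.ones.toNat - 2 by omega]
    · -- flush case
      have hcond : ¬ (c = '0' ∧ PySem.List.slice a.2 (some (-2)) none = ['1','1']) := by
        rintro ⟨hcc, hsl⟩
        subst hcc
        rw [hstack, lastTwo _ _ hlast] at hsl
        exact hc0 ⟨rfl, by omega⟩
      have hA : aStep a c = (a.1, a.2 ++ [c]) := by
        unfold aStep
        rw [if_neg hcond]
      have hB : bStep b c = ⟨b.parts ++ [PySem.List.pyRepeat ['1'] b.ones ++ [c]],
          b.flen + b.ones + 1, b.cnt, 0,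
          (if b.pos111 = -1 ∧ 3 ≤ b.ones then b.flen else b.pos111),
          (if c = '0' then b.flen + b.ones + 1 else b.zend)⟩ := by
        unfold bStep
        rw [if_neg hc1, if_neg (by rintro ⟨hcc, hge⟩; exact hc0 ⟨hcc, hge⟩)]
      rw [hA, hB]
      have hrep : PySem.List.pyRepeat ['1'] b.ones = List.replicate b.ones.toNat '1' :=
        PySem.List.pyRepeat_singleton '1' b.ones
      have hflat : (b.parts ++ [PySem.List.pyRepeat ['1'] b.ones ++ [c]]).flatten =
          b.parts.flatten ++ (List.replicate b.ones.toNat '1' ++ [c]) := by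
        rw [List.flatten_append, hrep]
        simp
      refine ⟨?_, hcnt, le_refl 0, ?_, ?_, ?_, ?_⟩
      · show a.2 ++ [c] = _ ++ List.replicate (0:Int).toNat '1'
        rw [hflat, hstack]
        simp
      · show b.flen + b.ones + 1 = _
        rw [hflat, hflen]
        simp
        omega
      · show (b.parts ++ [PySem.List.pyRepeat ['1'] b.ones ++ [c]]).flatten.getLast? ≠ some '1'
        rw [hflat]
        simp
        exact fun h => hc1 h
      · show Pos111OK (b.parts ++ [PySem.List.pyRepeat ['1'] b.ones ++ [c]]).flatten
            (if b.pos111 = -1 ∧ 3 ≤ b.ones then b.flen else b.pos111)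
        rw [hflat]
        have hlem := pos111_flush b.parts.flatten b.ones.toNat c b.pos111 hlast hc1 hpos
        by_cases hq : b.pos111 = -1 ∧ 3 ≤ b.ones
        · rw [if_pos hq, hflen]
          rwa [if_pos ⟨hq.1, by omega⟩] at hlem
        · rw [if_neg hq]
          rwa [if_neg (by rintro ⟨h1, h2⟩; exact hq ⟨h1, by omega⟩)] at hlem
      · show ZendOK (b.parts ++ [PySem.List.pyRepeat ['1'] b.ones ++ [c]]).flatten
            (if c = '0' then b.flen + b.ones + 1 else b.zend)
        rw [hflat]
        have hlem := zend_flush b.parts.flatten b.ones.toNat c b.zend hzend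
        by_cases hq : c = '0'
        · rw [if_pos hq, show b.flen + b.ones + 1 =
            ((b.parts.flatten.length : Int) + (b.ones.toNat : Int) + 1) from by rw [hflen]; omega]
          rwa [if_pos hq] at hlem
        · rw [if_neg hq]
          rwa [if_neg hq] at hlem

theorem fold_inv (l : List Char) (a : Int × List Char) (b : BState) (h : StInv a b) :
    StInv (l.foldl aStep a) (l.foldl bStep b) := by
  induction l generalizing a b with
  | nil => exact h
  | cons c l ih => exact ih _ _ (step_inv a b c h)

theorem init_inv : StInv (0, []) ⟨[], 0, 0, 0, -1, 0⟩ := by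
  refine ⟨by simp, rfl, le_refl 0, by simp, by simp, Or.inl ⟨rfl, ?_⟩, Or.inl ⟨rfl, by simp⟩⟩
  intro i h
  obtain ⟨h0, -, -⟩ := h
  simp at h0

theorem join_nil_eq_flatten (l : List (List Char)) : PySem.Chars.join [] l = l.flatten := by
  induction l with
  | nil => simp [PySem.Chars.join_nil]
  | cons x l ih =>
    cases l with
    | nil => simp [PySem.Chars.join_singleton]
    | cons y r =>
      rw [PySem.Chars.join_cons_cons, ih]
      simp

theorem step_eq (string : String) : solutionStep string = solutionAltStep string := by
  unfold solutionStep solutionAltStep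
  have hinv := fold_inv string.toList (0, []) ⟨[], 0, 0, 0, -1, 0⟩ init_inv
  set af := string.toList.foldl aStep (0, []) with haf
  set bf := string.toList.foldl bStep ⟨[], 0, 0, 0, -1, 0⟩ with hbf
  obtain ⟨hstack, hcnt, hones, hflen, hlast, hpos, hzend⟩ := hinv
  have hres : PySem.Chars.join [] bf.parts ++ PySem.List.pyRepeat ['1'] bf.ones = af.2 := by
    rw [join_nil_eq_flatten, PySem.List.pyRepeat_singleton, hstack]
  have hfind : PySem.Chars.find af.2 ['1','1','1'] =
      (if bf.pos111 = -1 ∧ 3 ≤ bf.ones then bf.flen else bf.pos111) := by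
    rw [hstack]
    have hlem := final_find bf.parts.flatten bf.ones.toNat bf.pos111 hlast hpos
    by_cases hq : bf.pos111 = -1 ∧ 3 ≤ bf.ones
    · rw [if_pos hq, hflen]
      rwa [if_pos ⟨hq.1, by omega⟩] at hlem
    · rw [if_neg hq]
      rwa [if_neg (by rintro ⟨h1, h2⟩; exact hq ⟨h1, by omega⟩)] at hlem
  have hrfind : PySem.Chars.rfind af.2 ['0'] = bf.zend - 1 := by
    rw [hstack]
    exact final_rfind bf.parts.flatten bf.ones.toNat bf.zend hzend
  simp only [hres, hcnt, hfind, hrfind]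
  by_cases hp : (if bf.pos111 = -1 ∧ 3 ≤ bf.ones then bf.flen else bf.pos111) = -1
  · rw [if_pos hp, if_neg (by simpa using hp)]
    rw [show bf.zend - 1 + 1 = bf.zend by ring]
  · rw [if_neg hp, if_pos hp]


-- ===== VERDICT (by name: the statement is the Claim_ definition above) =====
theorem solution_spec : Claim_equal_solution := by
  intro s _
  unfold Spec_solution solution solution_alt
  simp [step_eq]
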